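-- pv_equiv track=rewrite | github.com/jayeshh123/ibm-spectrum-scale-cloud-install | resources/common/scripts/prepare_scale_inv_json.py | interleave_nodes_by_fg
-- ===== SOURCE A (Python) =====
-- def interleave_nodes_by_fg(node_details):
--     failure_groups = {}
--     zone_list = []
--     for node in node_details:
--         ip = node['private_ip']
--         zone = node['zone']
--         if zone not in failure_groups:
--             failure_groups[zone] = []
--             zone_list.append(zone)
--         failure_groups[zone].append(ip)
--
--     instances = []
--     max_len = max(len(nodes) for nodes in failure_groups.values())
--     for idx in range(max_len):
--         for zone in zone_list:
--             nodes = failure_groups[zone]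
--             if idx < len(nodes):
--                 instances.append(nodes[idx])
--     return instances
-- ===== SOURCE B (Python) =====
-- def interleave_nodes_by_fg(node_details):
--     groups = {}
--     for node in node_details:
--         groups.setdefault(node['zone'], []).append(node['private_ip'])
--     out = []
--     cols = list(groups.values())
--     while cols:
--         out.extend(col[0] for col in cols)
--         cols = [col[1:] for col in cols if len(col) > 1]
--     return out
-- ===== Notes on version B (the rewrite author's own statement) =====
-- stated objective: alternative
-- what changed: A interleaves with a nested range(max_len) x zone_list loop guarded by an index bound; B keeps no max and no indices at all: it repeatedly emits the head of every zone column and drops columns that are spent, consuming the grouped lists round by round.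
import Mathlib
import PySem

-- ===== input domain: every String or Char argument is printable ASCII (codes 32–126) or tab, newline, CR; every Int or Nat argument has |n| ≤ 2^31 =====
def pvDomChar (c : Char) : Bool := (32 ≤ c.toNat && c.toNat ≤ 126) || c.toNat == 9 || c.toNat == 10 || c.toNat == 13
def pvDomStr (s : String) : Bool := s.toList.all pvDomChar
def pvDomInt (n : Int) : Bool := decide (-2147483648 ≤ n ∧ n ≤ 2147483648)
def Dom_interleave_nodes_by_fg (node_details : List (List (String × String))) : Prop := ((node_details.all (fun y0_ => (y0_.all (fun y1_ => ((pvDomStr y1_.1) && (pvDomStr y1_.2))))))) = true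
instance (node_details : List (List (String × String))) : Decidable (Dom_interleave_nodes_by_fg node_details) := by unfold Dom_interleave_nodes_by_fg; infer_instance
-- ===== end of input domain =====

-- B replaces A's idx-bounded double loop over range(max_len) × zone_list by repeated
-- rounds that emit the head of every zone column and drop exhausted columns (no max, no
-- index arithmetic); equality of the RETURN values is proved on non-empty inputs whose
-- nodes carry both keys.

-- ===== PORT A =====

-- node['private_ip'] / node['zone']: dict lookup, first match; KeyError (absent key) is
-- excluded by Pre_, where Python raises the port reads "".
def pvIpOf (node : List (String × String)) : String :=
  ((PySem.Dict.mk node).get? "private_ip").getD ""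

def pvZoneOf (node : List (String × String)) : String :=
  ((PySem.Dict.mk node).get? "zone").getD ""

def interleave_nodes_by_fg (node_details : List (List (String × String))) : List String :=
  -- state: (failure_groups, zone_list)
  let st := node_details.foldl
    (fun (st : PySem.Dict String (List String) × List String) node =>
      let ip := pvIpOf node
      let zone := pvZoneOf node
      let st := if st.1.contains zone = false
                then (st.1.insert zone [], st.2 ++ [zone]) else st
      -- failure_groups[zone].append(ip)
      (st.1.modify zone [] (fun l => l ++ [ip]), st.2))
    (PySem.Dict.empty, [])
  let failure_groups := st.1
  let zone_list := st.2
  -- max(len(nodes) for nodes in failure_groups.values()); ValueError on an empty dict is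
  -- excluded by Pre_ (the fold reads 0 there)
  let max_len := (failure_groups.values.map (fun nodes => nodes.length)).foldl max 0
  (List.range max_len).foldl
    (fun instances idx =>
      zone_list.foldl
        (fun instances zone =>
          let nodes := failure_groups.getD zone []
          if idx < nodes.length then instances ++ [nodes.getD idx ""] else instances)
        instances)
    []

-- ===== PORT B =====

-- [col[1:] for col in cols if len(col) > 1]: the next round's columns
def pvNext (cols : List (List String)) : List (List String) :=
  (cols.filter (fun col => 1 < col.length)).map (fun col => col.drop 1)

-- termination measure for the while loop of B (cited by pvRounds's decreasing_by)
theorem pvRounds_measure (cols : List (List String)) (h : cols ≠ []) :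
    ((pvNext cols).map List.length).sum + (pvNext cols).length
    < (cols.map List.length).sum + cols.length := by
  have aux : ∀ (cs : List (List String)),
      ((pvNext cs).map List.length).sum + (pvNext cs).length ≤ (cs.map List.length).sum := by
    intro cs
    induction cs with
    | nil => simp [pvNext]
    | cons c cs ih =>
      by_cases hc : 1 < c.length
      · simp only [pvNext] at ih ⊢
        rw [List.filter_cons_of_pos (by simpa using hc)]
        simp only [List.map_cons, List.sum_cons, List.length_cons, List.length_drop]
        omega
      · simp only [pvNext] at ih ⊢
        rw [List.filter_cons_of_neg (by simpa using hc)]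
        simp only [List.map_cons, List.sum_cons]
        omega
  have h1 := aux cols
  have h2 : 0 < cols.length := List.length_pos_iff.mpr h
  omega

-- the while loop of B: emit every column's head, then drop the spent columns
def pvRounds (cols : List (List String)) : List String :=
  if h : cols = [] then []
  else (cols.map (fun col => col.headD "")) ++ pvRounds (pvNext cols)
termination_by (cols.map List.length).sum + cols.length
decreasing_by exact pvRounds_measure cols h

def interleave_nodes_by_fg_alt (node_details : List (List (String × String))) : List String :=
  -- groups.setdefault(zone, []).append(ip)  ≡  groups[zone] = groups.get(zone, []) + [ip]
  let groups := node_details.foldl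
    (fun (d : PySem.Dict String (List String)) node =>
      d.modify (pvZoneOf node) [] (fun l => l ++ [pvIpOf node]))
    PySem.Dict.empty
  pvRounds groups.values

-- ===== PRECONDITION & SPEC =====

-- Pre_ excludes the empty list (A's max() raises ValueError there) and nodes missing the
-- 'private_ip' or 'zone' key (A raises KeyError there).
def Pre_interleave_nodes_by_fg (node_details : List (List (String × String))) : Prop :=
  node_details ≠ [] ∧
  ∀ node ∈ node_details,
    "private_ip" ∈ node.map Prod.fst ∧ "zone" ∈ node.map Prod.fst

instance (node_details : List (List (String × String))) : Decidable (Pre_interleave_nodes_by_fg node_details) := by unfold Pre_interleave_nodes_by_fg; infer_instance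

def pvWitness_interleave_nodes_by_fg : (List (List (String × String))) :=
  [[("private_ip", "10.0.0.1"), ("zone", "us-1")],
   [("private_ip", "10.0.0.2"), ("zone", "us-2")],
   [("private_ip", "10.0.0.3"), ("zone", "us-1")]]

def Spec_interleave_nodes_by_fg (node_details : List (List (String × String))) (out : List String) : Prop := out = interleave_nodes_by_fg_alt node_details
instance (node_details : List (List (String × String))) (out : List String) : Decidable (Spec_interleave_nodes_by_fg node_details out) := by unfold Spec_interleave_nodes_by_fg; infer_instance

-- ===== CLAIM (what is proved, stated in full; the proofs are below) =====
def Claim_equal_interleave_nodes_by_fg : Prop := ∀ (node_details : List (List (String × String))), Dom_interleave_nodes_by_fg node_details → Pre_interleave_nodes_by_fg node_details → Spec_interleave_nodes_by_fg node_details (interleave_nodes_by_fg node_details)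

-- ===== LEMMAS AND PROOFS =====

-- B's grouping fold (name for the proofs)
def pvGroups (node_details : List (List (String × String))) : PySem.Dict String (List String) :=
  node_details.foldl
    (fun (d : PySem.Dict String (List String)) node =>
      d.modify (pvZoneOf node) [] (fun l => l ++ [pvIpOf node]))
    PySem.Dict.empty

-- the idx-th interleaving row of a list of columns
def pvRow (cols : List (List String)) (idx : Nat) : List String :=
  cols.filterMap (fun col => col[idx]?)

-- recursive maximum (names A's foldl max)
def pvMaxN : List Nat → Nat
  | [] => 0
  | x :: xs => max x (pvMaxN xs)

theorem pvFoldlMax (l : List Nat) : ∀ a : Nat, l.foldl max a = max a (pvMaxN l) := by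
  induction l with
  | nil => intro a; simp [pvMaxN]
  | cons x xs ih => intro a; simp [pvMaxN, List.foldl_cons, ih, Nat.max_assoc]

-- phase 1: A's (failure_groups, zone_list) fold is B's grouping fold paired with its key list
theorem pvPhase1 (l : List (List (String × String))) :
    ∀ (fg : PySem.Dict String (List String)) (zl : List String), zl = fg.keys →
    (l.foldl
      (fun (st : PySem.Dict String (List String) × List String) node =>
        let ip := pvIpOf node
        let zone := pvZoneOf node
        let st := if st.1.contains zone = false
                  then (st.1.insert zone [], st.2 ++ [zone]) else st
        (st.1.modify zone [] (fun l => l ++ [ip]), st.2))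
      (fg, zl))
    = (l.foldl
        (fun (d : PySem.Dict String (List String)) node =>
          d.modify (pvZoneOf node) [] (fun l => l ++ [pvIpOf node])) fg,
       (l.foldl
        (fun (d : PySem.Dict String (List String)) node =>
          d.modify (pvZoneOf node) [] (fun l => l ++ [pvIpOf node])) fg).keys) := by
  induction l with
  | nil => intro fg zl h; simp [h]
  | cons node rest ih =>
    intro fg zl h
    simp only [List.foldl_cons]
    by_cases hc : fg.contains (pvZoneOf node) = false
    · rw [if_pos hc]
      have hd : (fg.insert (pvZoneOf node) []).modify (pvZoneOf node) [] (fun l => l ++ [pvIpOf node])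
          = fg.modify (pvZoneOf node) [] (fun l => l ++ [pvIpOf node]) := by
        show (fg.insert (pvZoneOf node) []).insert (pvZoneOf node) _ = fg.insert (pvZoneOf node) _
        rw [PySem.Dict.getD_insert_self, PySem.Dict.insert_insert_self,
            PySem.Dict.getD_of_not_contains fg [] hc]
      have hk : zl ++ [pvZoneOf node]
          = (fg.modify (pvZoneOf node) [] (fun l => l ++ [pvIpOf node])).keys := by
        rw [PySem.Dict.keys_modify, PySem.Dict.keys_insert_of_not_contains _ _ hc, h]
      rw [hd] at *
      exact ih _ _ hk
    · rw [if_neg hc]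
      have hc' : fg.contains (pvZoneOf node) = true := by
        cases hx : fg.contains (pvZoneOf node)
        · exact absurd hx hc
        · rfl
      have hk : zl = (fg.modify (pvZoneOf node) [] (fun l => l ++ [pvIpOf node])).keys := by
        rw [PySem.Dict.keys_modify, PySem.Dict.keys_insert_of_contains, h]
        exact hc'
      exact ih _ _ hk

theorem pvRow_zero (cols : List (List String)) (hne : ∀ col ∈ cols, col ≠ []) :
    pvRow cols 0 = cols.map (fun col => col.headD "") := by
  induction cols with
  | nil => rfl
  | cons col cs ih =>
    have hc : col ≠ [] := hne col (by simp)
    obtain ⟨a, t, rfl⟩ := List.exists_cons_of_ne_nil hc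
    simp only [pvRow, List.filterMap_cons, List.getElem?_cons_zero, List.map_cons, List.headD_cons]
    rw [← pvRow]
    rw [ih (fun col hm => hne col (by simp [hm]))]

theorem pvRow_succ (cols : List (List String)) (i : Nat) :
    pvRow cols (i + 1) = pvRow (pvNext cols) i := by
  induction cols with
  | nil => rfl
  | cons col cs ih =>
    by_cases hc : 1 < col.length
    · simp only [pvNext] at ih ⊢
      rw [List.filter_cons_of_pos (by simpa using hc)]
      simp only [pvRow, List.filterMap_cons, List.map_cons] at ih ⊢
      rw [List.getElem?_drop]
      rw [Nat.add_comm 1 i]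
      cases h : col[i + 1]? <;> simp [ih]
    · simp only [pvNext] at ih ⊢
      rw [List.filter_cons_of_neg (by simpa using hc)]
      have h0 : col[i+1]? = none := by
        rw [List.getElem?_eq_none_iff]; omega
      simp only [pvRow, List.filterMap_cons, h0]
      exact ih

theorem pvMaxN_step (cols : List (List String)) :
    pvMaxN ((pvNext cols).map List.length) = pvMaxN (cols.map List.length) - 1 := by
  induction cols with
  | nil => rfl
  | cons col cs ih =>
    by_cases hc : 1 < col.length
    · simp only [pvNext] at ih ⊢
      rw [List.filter_cons_of_pos (by simpa using hc)]
      simp only [List.map_cons, pvMaxN, List.length_drop, ih]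
      omega
    · simp only [pvNext] at ih ⊢
      rw [List.filter_cons_of_neg (by simpa using hc)]
      simp only [List.map_cons, pvMaxN, ih]
      omega

theorem pvLen_le_maxN (cols : List (List String)) (c : List String) (hc : c ∈ cols) :
    c.length ≤ pvMaxN (cols.map List.length) := by
  induction cols with
  | nil => simp at hc
  | cons d ds ih =>
    simp only [List.map_cons, pvMaxN]
    rcases List.mem_cons.mp hc with h | h
    · subst h; omega
    · have := ih h; omega

-- the transposition: B's rounds are A's row-by-row flattening
theorem pvRounds_eq (n : Nat) : ∀ (cols : List (List String)),
    pvMaxN (cols.map List.length) = n → (∀ col ∈ cols, col ≠ []) →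
    pvRounds cols = ((List.range n).map (pvRow cols)).flatten := by
  induction n with
  | zero =>
    intro cols hm hne
    cases cols with
    | nil => rw [pvRounds.eq_def]; simp
    | cons col cs =>
      exfalso
      have h1 := pvLen_le_maxN (col :: cs) col (by simp)
      have h2 : col ≠ [] := hne col (by simp)
      have : 0 < col.length := List.length_pos_iff.mpr h2
      omega
  | succ m ih =>
    intro cols hm hne
    have hcols : cols ≠ [] := by
      rintro rfl; simp [pvMaxN] at hm
    rw [pvRounds.eq_def, dif_neg hcols]
    have hstep : pvMaxN ((pvNext cols).map List.length) = m := by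
      rw [pvMaxN_step, hm]
      omega
    have hne' : ∀ col ∈ pvNext cols, col ≠ [] := by
      intro col hcol
      simp only [pvNext, List.mem_map, List.mem_filter] at hcol
      obtain ⟨d, ⟨_, hd⟩, rfl⟩ := hcol
      have hdl : 1 < d.length := by simpa using hd
      intro hnil
      have := List.length_drop (l := d) (i := 1)
      rw [hnil] at this
      simp at this
      omega
    rw [ih _ hstep hne']
    rw [List.range_succ_eq_map]
    simp only [List.map_cons, List.flatten_cons, List.map_map]
    rw [pvRow_zero cols hne]
    congr 1
    refine congrArg List.flatten (List.map_congr_left (fun i _ => ?_))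
    simp only [Function.comp_apply, Nat.succ_eq_add_one]
    exact (pvRow_succ cols i).symm

-- A's inner zone loop appends the idx-th row of the looked-up columns
theorem pvInner (fg : PySem.Dict String (List String)) (idx : Nat) (zs : List String) :
    ∀ acc : List String,
    zs.foldl
      (fun instances zone =>
        let nodes := fg.getD zone []
        if idx < nodes.length then instances ++ [nodes.getD idx ""] else instances)
      acc
    = acc ++ pvRow (zs.map (fun z => fg.getD z [])) idx := by
  induction zs with
  | nil => intro acc; simp [pvRow]
  | cons z zs ih =>
    intro acc
    simp only [List.foldl_cons, List.map_cons, pvRow, List.filterMap_cons]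
    by_cases hlt : idx < (fg.getD z []).length
    · rw [if_pos hlt]
      have : (fg.getD z [])[idx]? = some ((fg.getD z []).getD idx "") := by
        rw [List.getD_eq_getElem?_getD, List.getElem?_eq_getElem hlt]
        simp
      rw [this, ih]
      simp [pvRow]
    · rw [if_neg hlt]
      have : (fg.getD z [])[idx]? = none := by
        rw [List.getElem?_eq_none_iff]; omega
      rw [this, ih]
      rfl

theorem pvGroups_keys_nodup (l : List (List (String × String))) : (pvGroups l).keys.Nodup := by
  exact PySem.Dict.nodup_keys_foldl_modify_key l pvZoneOf []
    (fun _ node => fun ls => ls ++ [pvIpOf node]) PySem.Dict.empty PySem.Dict.nodup_keys_empty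

theorem pvGroups_getD (l : List (List (String × String))) (z : String) :
    (pvGroups l).getD z [] = ((l.map (fun n => (pvZoneOf n, pvIpOf n))).filter
        (fun p => p.1 == z)).map (fun p => p.2) := by
  have h1 : pvGroups l = (l.map (fun n => (pvZoneOf n, pvIpOf n))).foldl
      (fun d p => d.modify p.1 [] (fun x => x ++ [p.2])) PySem.Dict.empty := by
    rw [List.foldl_map]
    rfl
  rw [h1, PySem.Dict.getD_foldl_modify_append, PySem.Dict.getD_empty]
  simp

theorem pvGroups_values_ne_nil (l : List (List (String × String))) :
    ∀ v ∈ (pvGroups l).values, v ≠ [] := by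
  intro v hv
  rw [PySem.Dict.values_eq_map_keys _ (pvGroups_keys_nodup l) []] at hv
  obtain ⟨z, hz, rfl⟩ := List.mem_map.mp hv
  have hzk : z ∈ (l.map pvZoneOf) := by
    have hk := PySem.Dict.keys_foldl_modify_key l pvZoneOf []
      (fun _ node => fun ls => ls ++ [pvIpOf node]) PySem.Dict.empty
    rw [pvGroups] at hz
    rw [hk] at hz
    rw [PySem.Dict.keys_empty] at hz
    have hset : z ∈ PySem.Set.ofList (l.map pvZoneOf) := hz
    exact (PySem.Set.mem_ofList _ _).mp hset
  rw [pvGroups_getD]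
  obtain ⟨n, hn, rfl⟩ := List.mem_map.mp hzk
  intro hnil
  have hmem : (pvZoneOf n, pvIpOf n) ∈ (l.map (fun n => (pvZoneOf n, pvIpOf n))).filter
      (fun p => p.1 == pvZoneOf n) := by
    rw [List.mem_filter]
    exact ⟨List.mem_map.mpr ⟨n, hn, rfl⟩, by simp⟩
  rw [List.map_eq_nil_iff.mp hnil] at hmem
  simp at hmem

-- A's outer idx loop flattens the rows
theorem pvOuter (fg : PySem.Dict String (List String)) (zs : List String) :
    ∀ (ns : List Nat) (acc : List String),
    ns.foldl
      (fun instances idx =>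
        zs.foldl
          (fun instances zone =>
            let nodes := fg.getD zone []
            if idx < nodes.length then instances ++ [nodes.getD idx ""] else instances)
          instances)
      acc
    = acc ++ ((ns.map (fun idx => pvRow (zs.map (fun z => fg.getD z [])) idx)).flatten) := by
  intro ns
  induction ns with
  | nil => intro acc; simp
  | cons i ns ih =>
    intro acc
    simp only [List.foldl_cons, List.map_cons, List.flatten_cons]
    rw [pvInner, ih]
    simp

-- ===== VERDICT (by name: the statement is the Claim_ definition above) =====
theorem interleave_nodes_by_fg_spec : Claim_equal_interleave_nodes_by_fg := by
  intro nd _ _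
  unfold Spec_interleave_nodes_by_fg interleave_nodes_by_fg interleave_nodes_by_fg_alt
  rw [pvPhase1 nd PySem.Dict.empty [] (by rw [PySem.Dict.keys_empty])]
  have hg : (nd.foldl
      (fun (d : PySem.Dict String (List String)) node =>
        d.modify (pvZoneOf node) [] (fun l => l ++ [pvIpOf node])) PySem.Dict.empty)
      = pvGroups nd := rfl
  rw [hg]
  simp only [pvOuter, List.nil_append]
  have hvals : (pvGroups nd).keys.map (fun z => (pvGroups nd).getD z []) = (pvGroups nd).values :=
    (PySem.Dict.values_eq_map_keys (pvGroups nd) (pvGroups_keys_nodup nd) []).symm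
  rw [hvals]
  have hmax : (((pvGroups nd).values.map (fun nodes => nodes.length)).foldl max 0)
      = pvMaxN ((pvGroups nd).values.map List.length) := by
    rw [pvFoldlMax]
    simp
  rw [hmax]
  rw [pvRounds_eq (pvMaxN ((pvGroups nd).values.map List.length)) (pvGroups nd).values rfl
      (pvGroups_values_ne_nil nd)]
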